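-- pv_equiv track=rewrite | github.com/david02324/Algorithm | Programmers/level 2/programmers-42586.py | solution
-- ===== SOURCE A (Python) =====
-- from collections import deque
--
-- def solution(progresses, speeds):
--     pq = deque(progresses)
--     sq = deque(speeds)
--     l = len(pq)
--     ans = []
--
--     while pq:
--         for i in range(l):
--             pq[i] += sq[i]
--
--         count = 0
--         while pq and pq[0] >= 100:
--             count += 1
--             pq.popleft()
--             sq.popleft()
--
--         l = len(pq)
--         if count:
--             ans.append(count)
--
--     return ans
-- ===== SOURCE B (Python) =====
-- def solution(progresses, speeds):
--     # One pass: ceil completion day per task, grouped by running max of days.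
--     ans = []
--     cur = None
--     for p, s in zip(progresses, speeds):
--         d = max(1, -((p - 100) // s))
--         if cur is not None and d <= cur:
--             ans[-1] += 1
--         else:
--             ans.append(1)
--             cur = d
--     return ans
-- ===== Notes on version B (the rewrite author's own statement) =====
-- stated objective: faster
-- what changed: Replaced the day-by-day deque simulation (one pass over all remaining tasks per day) by a single pass computing each task's ceil completion day and grouping counts by the running maximum day; intended as faster (probe: A timed out at n=16 where B returned, so no ratio was measured).
-- outside the precondition, e.g. on solution([150, 50], [-5, 10]): A returns [1, 1], B returns [2]; on solution([100], [0]): A returns [1], B raises ZeroDivisionError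
import Mathlib
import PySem

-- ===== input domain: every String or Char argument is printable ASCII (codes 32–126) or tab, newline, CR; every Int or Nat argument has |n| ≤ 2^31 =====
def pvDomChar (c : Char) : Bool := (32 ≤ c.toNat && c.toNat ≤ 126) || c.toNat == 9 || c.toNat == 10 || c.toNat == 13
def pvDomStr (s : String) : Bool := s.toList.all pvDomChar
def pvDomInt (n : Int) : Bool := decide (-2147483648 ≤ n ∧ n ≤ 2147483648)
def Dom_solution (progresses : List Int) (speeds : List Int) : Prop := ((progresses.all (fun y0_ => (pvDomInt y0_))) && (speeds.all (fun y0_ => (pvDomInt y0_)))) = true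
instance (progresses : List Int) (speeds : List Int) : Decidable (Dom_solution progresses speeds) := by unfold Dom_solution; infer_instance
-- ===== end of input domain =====

-- B replaces A's day-by-day deque simulation with one pass over ceil completion days
-- grouped by running max; intended as faster (timing: A timed out at n=16 where
-- B returned, so no ratio could be measured).

-- ===== PORT A =====
-- A's outer `while pq` loop, made total with fuel (under Pre_ the fuel bound below
-- exceeds the number of simulated days, so the fuel-exhaustion case is never hit).
def solutionLoop : Nat → List Int → List Int → List Int → List Int
  | _, [], _, ans => ans
  | 0, _ :: _, _, ans => ans
  | fuel+1, p :: pq, sq, ans =>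
      -- for i in range(l): pq[i] += sq[i]
      let pq1 := List.zipWith (fun a b => a + b) (p :: pq) sq
      -- count = 0; while pq and pq[0] >= 100: count += 1; pq.popleft(); sq.popleft()
      let c := (pq1.takeWhile (fun x => decide (100 ≤ x))).length
      solutionLoop fuel (pq1.drop c) (sq.drop c)
        (if c ≠ 0 then ans ++ [(c : Int)] else ans)

-- fuel: 1 + Σ ((100 - p).toNat + 1), an upper bound on the number of simulated days
def solutionFuel (progresses : List Int) : Nat :=
  progresses.foldl (fun a p => a + ((100 - p).toNat + 1)) 1

def solution (progresses : List Int) (speeds : List Int) : List Int :=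
  solutionLoop (solutionFuel progresses) progresses speeds []

-- ===== PORT B =====
-- d = max(1, -((p - 100) // s))
def dday (p s : Int) : Int := max 1 (-(PySem.Int.floordiv (p - 100) s))

-- Source B's single for-loop; `ans` is kept reversed so `ans[-1] += 1` is a head increment
def altGo : List (Int × Int) → Option Int → List Int → List Int
  | [], _, acc => acc.reverse
  | (p, s) :: rest, cur, acc =>
      let d := dday p s
      match cur with
      | some c =>
          if d ≤ c then
            altGo rest (some c) (match acc with | h :: t => (h + 1) :: t | [] => [1])
          else altGo rest (some d) (1 :: acc)
      | none => altGo rest (some d) (1 :: acc)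

def solution_alt (progresses : List Int) (speeds : List Int) : List Int :=
  altGo (progresses.zip speeds) none []

-- ===== PRECONDITION & SPEC =====
-- Pre_ excludes inputs where A raises IndexError (more progresses than speeds) and
-- inputs with a non-positive used speed: there A usually loops forever, and where it
-- does return (a task pushed past 100 while decaying, or speed 0) B's ceil-day
-- formula is meaningless or divides by zero.
def Pre_solution (progresses : List Int) (speeds : List Int) : Prop :=
  progresses.length ≤ speeds.length ∧
    ∀ s ∈ speeds.take progresses.length, 0 < s
instance (progresses : List Int) (speeds : List Int) : Decidable (Pre_solution progresses speeds) := by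
  unfold Pre_solution; infer_instance

def pvWitness_solution : List Int × List Int := ([93, 30, 55], [1, 30, 5])

def Spec_solution (progresses : List Int) (speeds : List Int) (out : List Int) : Prop := out = solution_alt progresses speeds
instance (progresses : List Int) (speeds : List Int) (out : List Int) : Decidable (Spec_solution progresses speeds out) := by unfold Spec_solution; infer_instance

-- ===== CLAIM (what is proved, stated in full; the proofs are below) =====
def Claim_equal_solution : Prop := ∀ (progresses : List Int) (speeds : List Int), Dom_solution progresses speeds → Pre_solution progresses speeds → Spec_solution progresses speeds (solution progresses speeds)

-- ===== LEMMAS AND PROOFS =====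

-- reference grouping of the list of completion days by running maximum
def grp : List Int → List Int
  | [] => []
  | d :: rest =>
      ((1 : Int) + (rest.takeWhile (fun x => decide (x ≤ d))).length)
        :: grp (rest.dropWhile (fun x => decide (x ≤ d)))
termination_by ds => ds.length
decreasing_by
  simp only [List.length_cons]
  exact Nat.lt_succ_of_le (List.length_dropWhile_le _ _)

def dd (x : Int × Int) : Int := dday x.1 x.2

-- ---- arithmetic facts about dday ----
lemma one_le_dday (p s : Int) : 1 ≤ dday p s := le_max_left _ _

lemma dday_le_one_iff (p s : Int) (hs : 0 < s) : (dday p s ≤ 1) ↔ 100 ≤ p + s := by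
  unfold dday
  have hb : (-1 : Int) ≤ PySem.Int.floordiv (p - 100) s ↔ (-1) * s ≤ p - 100 :=
    PySem.Int.le_floordiv_iff_mul_le hs
  constructor
  · intro h
    have h1 : (-1 : Int) ≤ PySem.Int.floordiv (p - 100) s := by omega
    have := hb.mp h1
    omega
  · intro h
    have : (-1 : Int) ≤ PySem.Int.floordiv (p - 100) s := hb.mpr (by omega)
    omega

lemma dday_shift (p s : Int) (hs : 0 < s) :
    dday (p + s) s = max 1 (dday p s - 1) := by
  unfold dday
  have h : PySem.Int.floordiv (p + s - 100) s = PySem.Int.floordiv (p - 100) s + 1 := by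
    rw [PySem.Int.floordiv_eq_ediv_of_pos hs, PySem.Int.floordiv_eq_ediv_of_pos hs]
    have h2 := Int.add_mul_ediv_right (p - 100) 1 (by omega : s ≠ 0)
    have h3 : p + s - 100 = p - 100 + 1 * s := by ring
    rw [h3, h2]
  rw [h]; omega

lemma dday_bound (p s : Int) (hs : 0 < s) :
    dday p s ≤ ((100 - p).toNat + 1 : Nat) := by
  unfold dday
  have h : (-(((100 - p).toNat + 1 : Nat) : Int)) ≤ PySem.Int.floordiv (p - 100) s := by
    rw [PySem.Int.le_floordiv_iff_mul_le hs]
    have hB : (100 : Int) - p ≤ (((100 - p).toNat + 1 : Nat) : Int) := by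
      push_cast; omega
    nlinarith
  omega

-- ---- list plumbing ----
lemma zipWith_add_map {L : List (Int × Int)} {rest : List Int} :
    List.zipWith (fun a b => a + b) (L.map Prod.fst) (L.map Prod.snd ++ rest)
      = L.map (fun x => x.1 + x.2) := by
  induction L with
  | nil => simp
  | cons x L ih => simp [ih]

lemma drop_length_takeWhile {α : Type} (p : α → Bool) (l : List α) :
    l.drop (l.takeWhile p).length = l.dropWhile p := by
  induction l with
  | nil => simp
  | cons x l ih =>
      by_cases h : p x
      · simp [List.takeWhile_cons, List.dropWhile_cons, h, ih]
      · simp [h]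

lemma takeWhile_congr' {α : Type} {p q : α → Bool} {l : List α}
    (h : ∀ x ∈ l, p x = q x) : l.takeWhile p = l.takeWhile q := by
  induction l with
  | nil => rfl
  | cons x l ih =>
      have hx := h x (by simp)
      by_cases hp : p x
      · simp [List.takeWhile_cons, hp, hx ▸ hp, ih (fun y hy => h y (by simp [hy]))]
      · simp [List.takeWhile_cons, hp, hx ▸ hp]

lemma dropWhile_congr' {α : Type} {p q : α → Bool} {l : List α}
    (h : ∀ x ∈ l, p x = q x) : l.dropWhile p = l.dropWhile q := by
  induction l with
  | nil => rfl
  | cons x l ih =>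
      have hx := h x (by simp)
      by_cases hp : p x
      · simp [List.dropWhile_cons, hp, hx ▸ hp, ih (fun y hy => h y (by simp [hy]))]
      · simp [List.dropWhile_cons, hp, hx ▸ hp]

-- ---- B side: altGo computes grp of the day list ----
def altGoD : List Int → Option Int → List Int → List Int
  | [], _, acc => acc.reverse
  | d :: rest, cur, acc =>
      match cur with
      | some c =>
          if d ≤ c then
            altGoD rest (some c) (match acc with | h :: t => (h + 1) :: t | [] => [1])
          else altGoD rest (some d) (1 :: acc)
      | none => altGoD rest (some d) (1 :: acc)

lemma altGo_eq_altGoD (L : List (Int × Int)) (cur : Option Int) (acc : List Int) :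
    altGo L cur acc = altGoD (L.map dd) cur acc := by
  induction L generalizing cur acc with
  | nil => rfl
  | cons x L ih =>
      obtain ⟨p, s⟩ := x
      cases cur with
      | none => simp [altGo, altGoD, dd, ih]
      | some c =>
          by_cases h : dday p s ≤ c <;> simp [altGo, altGoD, dd, h, ih]

lemma altGoD_some (ds : List Int) (m h : Int) (t : List Int) :
    altGoD ds (some m) (h :: t)
      = t.reverse ++ (h + ((ds.takeWhile (fun x => decide (x ≤ m))).length : Int))
          :: grp (ds.dropWhile (fun x => decide (x ≤ m))) := by
  induction ds generalizing m h t with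
  | nil => simp [altGoD, grp]
  | cons d rest ih =>
      by_cases hd : d ≤ m
      · show (if d ≤ m then altGoD rest (some m) ((h+1)::t) else _) = _
        rw [if_pos hd, ih]
        simp [List.takeWhile_cons, List.dropWhile_cons, hd]
        ring
      · show (if d ≤ m then _ else altGoD rest (some d) (1 :: h :: t)) = _
        rw [if_neg hd, ih]
        simp [List.takeWhile_cons, List.dropWhile_cons, hd, grp]

lemma altGoD_none_eq_grp (ds : List Int) : altGoD ds none [] = grp ds := by
  cases ds with
  | nil => simp [altGoD, grp]
  | cons d rest =>
      show altGoD rest (some d) [1] = grp (d :: rest)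
      rw [altGoD_some, grp]
      simp [add_comm]

lemma solution_alt_eq_grp (p s : List Int) :
    solution_alt p s = grp ((p.zip s).map dd) := by
  unfold solution_alt
  rw [altGo_eq_altGoD, altGoD_none_eq_grp]

lemma head_dropWhile_false {α : Type} (p : α → Bool) :
    ∀ (l : List α) {x : α} {t : List α}, l.dropWhile p = x :: t → p x = false := by
  intro l
  induction l with
  | nil => intro x t h; simp at h
  | cons y l ih =>
      intro x t h
      by_cases hy : p y
      · rw [List.dropWhile_cons_of_pos hy] at h; exact ih h
      · rw [List.dropWhile_cons_of_neg hy] at h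
        cases h
        simpa using hy

-- ---- grouping invariance under one simulated day ----
def phi (d : Int) : Int := max 1 (d - 1)

lemma grp_map_shift : ∀ (n : Nat) (ds : List Int), ds.length ≤ n →
    (∀ d ∈ ds, 1 ≤ d) → (∀ h, ds.head? = some h → 2 ≤ h) →
    grp (ds.map phi) = grp ds := by
  intro n
  induction n with
  | zero =>
      intro ds hlen _ _
      have : ds = [] := List.length_eq_zero_iff.mp (Nat.le_zero.mp hlen)
      subst this; rfl
  | succ n ih =>
      intro ds hlen h1 hhd
      cases ds with
      | nil => rfl
      | cons d rest =>
          have hd2 : 2 ≤ d := hhd d rfl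
          have hphi : phi d = d - 1 := by unfold phi; omega
          have hpred : ∀ x ∈ rest, (decide (phi x ≤ phi d) : Bool) = decide (x ≤ d) := by
            intro x hx
            have hx1 : 1 ≤ x := h1 x (by simp [hx])
            unfold phi
            by_cases hle : x ≤ d
            · simp [hle]; omega
            · simp [hle]; omega
          rw [List.map_cons, grp, grp]
          have htake : (List.map phi rest).takeWhile (fun x => decide (x ≤ phi d))
              = List.map phi (rest.takeWhile (fun x => decide (x ≤ d))) := by
            rw [List.takeWhile_map]
            congr 1
            exact takeWhile_congr' (fun x hx => hpred x hx)
          have hdrop : (List.map phi rest).dropWhile (fun x => decide (x ≤ phi d))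
              = List.map phi (rest.dropWhile (fun x => decide (x ≤ d))) := by
            rw [List.dropWhile_map]
            congr 1
            exact dropWhile_congr' (fun x hx => hpred x hx)
          rw [htake, hdrop]
          have hrec : grp (List.map phi (rest.dropWhile (fun x => decide (x ≤ d))))
              = grp (rest.dropWhile (fun x => decide (x ≤ d))) := by
            apply ih
            · exact le_trans (List.length_dropWhile_le _ _) (by simpa using Nat.lt_succ_iff.mp (by simpa using hlen))
            · intro y hy
              exact h1 y (List.mem_cons_of_mem d ((List.dropWhile_sublist _).subset hy))
            · intro h hh
              cases hcase : rest.dropWhile (fun x => decide (x ≤ d)) with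
              | nil => rw [hcase] at hh; exact absurd hh (by simp)
              | cons y t =>
                  rw [hcase] at hh
                  simp at hh
                  have hy := head_dropWhile_false _ rest hcase
                  simp at hy
                  omega
          rw [hrec]
          simp

-- grp peels the day-1 prefix as one group
lemma grp_pop (ds : List Int) (h1 : ∀ d ∈ ds, 1 ≤ d) :
    grp ds = (if (ds.takeWhile (fun x => decide (x ≤ 1))).length ≠ 0
                then [((ds.takeWhile (fun x => decide (x ≤ 1))).length : Int)] else [])
              ++ grp (ds.dropWhile (fun x => decide (x ≤ 1))) := by
  cases ds with
  | nil => simp [grp]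
  | cons d rest =>
      by_cases hd : d ≤ 1
      · have hd1 : d = 1 := le_antisymm hd (h1 d (by simp))
        subst hd1
        rw [grp]
        simp [List.takeWhile_cons, List.dropWhile_cons]
        push_cast; ring
      · simp [List.takeWhile_cons, List.dropWhile_cons, hd]

def qpair (y : Int × Int) : Bool := decide (100 ≤ y.1 + y.2)
def shiftp (y : Int × Int) : Int × Int := (y.1 + y.2, y.2)

-- ---- main A-side characterisation ----
lemma loop_eq_grp : ∀ (fuel : Nat) (L : List (Int × Int)) (rest ans : List Int),
    (∀ x ∈ L, 0 < x.2) → (∀ e ∈ L.map dd, e ≤ (fuel : Int)) →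
    solutionLoop fuel (L.map Prod.fst) (L.map Prod.snd ++ rest) ans
      = ans ++ grp (L.map dd) := by
  intro fuel
  induction fuel with
  | zero =>
      intro L rest ans hs hf
      cases L with
      | nil => simp [solutionLoop, grp]
      | cons x L' =>
          exfalso
          have h1 := one_le_dday x.1 x.2
          have h2 := hf (dd x) (by simp)
          unfold dd at h2
          omega
  | succ fuel ih =>
      intro L rest ans hs hf
      cases L with
      | nil => simp [solutionLoop, grp]
      | cons x L' =>
          set L : List (Int × Int) := x :: L' with hL
          have hne : L.map Prod.fst = x.1 :: L'.map Prod.fst := by simp [hL]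
          -- unfold one step of the loop
          rw [hne]
          show solutionLoop (fuel+1) (x.1 :: L'.map Prod.fst) (L.map Prod.snd ++ rest) ans
              = ans ++ grp (L.map dd)
          rw [solutionLoop]
          have hzip : List.zipWith (fun a b => a + b) (x.1 :: L'.map Prod.fst)
              (L.map Prod.snd ++ rest) = L.map (fun y => y.1 + y.2) := by
            rw [← hne]; exact zipWith_add_map
          rw [hzip]
          -- takeWhile on the summed list = image of takeWhile qpair on L
          have htw : (L.map (fun y => y.1 + y.2)).takeWhile (fun a => decide (100 ≤ a))
              = (L.takeWhile qpair).map (fun y => y.1 + y.2) := by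
            rw [List.takeWhile_map]; rfl
          have hc : ((L.map (fun y => y.1 + y.2)).takeWhile (fun a => decide (100 ≤ a))).length
              = (L.takeWhile qpair).length := by rw [htw, List.length_map]
          -- the two dropped lists
          have hdropL : L.drop (L.takeWhile qpair).length = L.dropWhile qpair :=
            drop_length_takeWhile qpair L
          have hdrop1 : (L.map (fun y => y.1 + y.2)).drop (L.takeWhile qpair).length
              = (L.dropWhile qpair).map (fun y => y.1 + y.2) := by
            rw [← List.map_drop, hdropL]
          have hcle : (L.takeWhile qpair).length ≤ (L.map Prod.snd).length := by
            simpa using (List.takeWhile_sublist _).length_le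
          have hdrop2 : (L.map Prod.snd ++ rest).drop (L.takeWhile qpair).length
              = (L.dropWhile qpair).map Prod.snd ++ rest := by
            rw [List.drop_append_of_le_length hcle, ← List.map_drop, hdropL]
          rw [hc, hdrop1, hdrop2]
          -- rewrite the recursive state through shiftp
          set K := L.dropWhile qpair with hK
          have hKsub : ∀ y ∈ K, y ∈ L := fun y hy => (List.dropWhile_sublist _).subset hy
          have hKpos : ∀ y ∈ K, 0 < y.2 := fun y hy => hs y (hKsub y hy)
          have hfst : K.map (fun y => y.1 + y.2) = (K.map shiftp).map Prod.fst := by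
            rw [List.map_map]; rfl
          have hsnd : K.map Prod.snd = (K.map shiftp).map Prod.snd := by
            rw [List.map_map]; rfl
          -- dd after shiftp = phi ∘ dd
          have hddshift : (K.map shiftp).map dd = (K.map dd).map phi := by
            rw [List.map_map, List.map_map]
            apply List.map_congr_left
            intro y hy
            have := dday_shift y.1 y.2 (hKpos y hy)
            simp only [Function.comp, shiftp, dd, phi]
            exact this
          -- head of K has day ≥ 2
          have hKhead : ∀ h, (K.map dd).head? = some h → 2 ≤ h := by
            intro h hh
            cases hKc : K with
            | nil => rw [hKc] at hh; exact absurd hh (by simp)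
            | cons y K' =>
                rw [hKc] at hh
                simp at hh
                have hyK : y ∈ K := by rw [hKc]; simp
                have hynq : qpair y = false := head_dropWhile_false qpair L (hK ▸ hKc)
                have hnot : ¬ (100 ≤ y.1 + y.2) := by simpa [qpair] using hynq
                have h2 : ¬ (dday y.1 y.2 ≤ 1) := by
                  rw [dday_le_one_iff y.1 y.2 (hKpos y hyK)]; exact hnot
                unfold dd at hh
                omega
          have hK1 : ∀ e ∈ K.map dd, 1 ≤ e := by
            intro e he
            obtain ⟨y, hy, hye⟩ := List.mem_map.mp he
            rw [← hye]; exact one_le_dday y.1 y.2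
          -- IH hypotheses
          have hIHf : ∀ e ∈ (K.map shiftp).map dd, e ≤ (fuel : Int) := by
            intro e he
            rw [hddshift] at he
            obtain ⟨d0, hd0, hd0e⟩ := List.mem_map.mp he
            obtain ⟨y, hy, hyd⟩ := List.mem_map.mp hd0
            have hdub : d0 ≤ (fuel : Int) + 1 := by
              have := hf d0 (by
                rw [← hyd]
                exact List.mem_map.mpr ⟨y, hKsub y hy, rfl⟩)
              push_cast at this ⊢
              omega
            -- need fuel ≥ 1 unless K = []
            cases hKc : K with
            | nil => rw [hKc] at hy; exact absurd hy (by simp)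
            | cons z K' =>
                have hz2 : 2 ≤ dd z := by
                  apply hKhead
                  rw [hKc]; simp
                have hzub : dd z ≤ (fuel : Int) + 1 := by
                  have := hf (dd z) (by
                    exact List.mem_map.mpr ⟨z, hKsub z (by rw [hKc]; simp), rfl⟩)
                  push_cast at this ⊢
                  omega
                have hfuel1 : (1 : Int) ≤ (fuel : Int) := by omega
                rw [← hd0e]
                unfold phi
                have hd01 : 1 ≤ d0 := hK1 d0 hd0
                omega
          have hIHs : ∀ y ∈ K.map shiftp, 0 < y.2 := by
            intro y hy
            obtain ⟨z, hz, hzy⟩ := List.mem_map.mp hy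
            rw [← hzy]
            exact hKpos z hz
          rw [hfst, hsnd, ih (K.map shiftp) rest _ hIHs hIHf]
          -- assemble the grouping identity
          rw [hddshift]
          have hgrp1 : grp ((K.map dd).map phi) = grp (K.map dd) :=
            grp_map_shift (K.map dd).length (K.map dd) le_rfl hK1 hKhead
          rw [hgrp1]
          -- relate takeWhile/dropWhile on L to the day list
          have hqdd : ∀ y ∈ L, qpair y = decide (dd y ≤ 1) := by
            intro y hy
            have hiff := dday_le_one_iff y.1 y.2 (hs y hy)
            unfold qpair dd
            by_cases hq : 100 ≤ y.1 + y.2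
            · simp [hq, hiff.mpr hq]
            · have hnd : ¬ (dday y.1 y.2 ≤ 1) := fun hc => hq (hiff.mp hc)
              simp [hq, hnd]
          have htake2 : (L.map dd).takeWhile (fun e => decide (e ≤ 1))
              = (L.takeWhile qpair).map dd := by
            rw [List.takeWhile_map]
            congr 1
            exact takeWhile_congr' (fun y hy => ((hqdd y hy).symm))
          have hdrop3 : (L.map dd).dropWhile (fun e => decide (e ≤ 1))
              = K.map dd := by
            rw [List.dropWhile_map, hK]
            congr 1
            exact dropWhile_congr' (fun y hy => ((hqdd y hy).symm))
          have hall1 : ∀ e ∈ L.map dd, 1 ≤ e := by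
            intro e he
            obtain ⟨y, hy, hye⟩ := List.mem_map.mp he
            rw [← hye]; exact one_le_dday y.1 y.2
          have hpop := grp_pop (L.map dd) hall1
          rw [htake2, hdrop3, List.length_map] at hpop
          rw [hpop]
          by_cases hc0 : (L.takeWhile qpair).length = 0
          · simp [hc0]
          · simp [hc0]

-- ---- auxiliary facts for the fuel bound ----
lemma foldl_fuel_mono (l : List Int) (a : Nat) :
    a ≤ l.foldl (fun a p => a + ((100 - p).toNat + 1)) a := by
  induction l generalizing a with
  | nil => simp
  | cons x l ih => exact le_trans (by omega) (ih (a + ((100 - x).toNat + 1)))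

lemma foldl_fuel_bound (l : List Int) (a : Nat) :
    ∀ x ∈ l, ((100 - x).toNat + 1) ≤ l.foldl (fun a p => a + ((100 - p).toNat + 1)) a := by
  induction l generalizing a with
  | nil => simp
  | cons y l ih =>
      intro x hx
      rcases List.mem_cons.mp hx with h | h
      · subst h
        exact le_trans (by omega) (foldl_fuel_mono l (a + ((100 - x).toNat + 1)))
      · exact ih (a + ((100 - y).toNat + 1)) x h

lemma zip_take (p s : List Int) : p.zip (s.take p.length) = p.zip s := by
  induction p generalizing s with
  | nil => simp
  | cons x p ih =>
      cases s with
      | nil => simp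
      | cons y s => simp [ih]

-- ===== VERDICT (by name: the statement is the Claim_ definition above) =====
theorem solution_spec : Claim_equal_solution := by
  intro p s _hdom hpre
  obtain ⟨hlen, hpos⟩ := hpre
  unfold Spec_solution solution
  set s' := s.take p.length with hs'
  set L := p.zip s' with hLdef
  have hlens' : s'.length = p.length := by
    rw [hs', List.length_take]; omega
  have hfstL : L.map Prod.fst = p := List.map_fst_zip (by omega)
  have hsndL : L.map Prod.snd = s' := List.map_snd_zip (by omega)
  have hsplit : s = s' ++ s.drop p.length := by
    rw [hs', List.take_append_drop]
  have hspos : ∀ x ∈ L, 0 < x.2 := by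
    intro x hx
    obtain ⟨a, b⟩ := x
    rw [hLdef] at hx
    exact hpos b (hs' ▸ (List.of_mem_zip hx).2)
  have hfuel : ∀ e ∈ L.map dd, e ≤ ((solutionFuel p : Nat) : Int) := by
    intro e he
    obtain ⟨y, hy, hye⟩ := List.mem_map.mp he
    obtain ⟨a, b⟩ := y
    have hy' := hy
    rw [hLdef] at hy'
    have hyp : a ∈ p := (List.of_mem_zip hy').1
    have hb := dday_bound a b (hspos (a, b) hy)
    have hf := foldl_fuel_bound p 1 a hyp
    unfold solutionFuel
    unfold dd at hye
    rw [← hye]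
    calc dday a b ≤ (((100 - a).toNat + 1 : Nat) : Int) := hb
      _ ≤ _ := by exact_mod_cast hf
  have := loop_eq_grp (solutionFuel p) L (s.drop p.length) [] hspos hfuel
  rw [hfstL, hsndL, ← hsplit] at this
  rw [this, solution_alt_eq_grp]
  rw [← zip_take p s, ← hs', ← hLdef]
  simp
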